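-- pv_equiv track=rewrite | github.com/KB1994/Parsing_App | Backend/Commun.py | insert_product
-- ===== SOURCE A (Python) =====
-- def insert_product (list_cell, band_Product_RF):
--
--     for el in list_cell:
--         if 'userLabel' in el.keys():
--             if el['userLabel'].startswith('U') or el['userLabel'].startswith('V') or el['userLabel'].startswith('W'):
--                 el["Rf_Conf"] = band_Product_RF['2100']
--             elif el['userLabel'].startswith('G'):
--                 el["Rf_Conf"] = band_Product_RF['900']
--             else:
--                 el["Rf_Conf"] = ''
--         else:
--
--             if(el['cellname'].startswith('P') or el['cellname'].startswith('Y') ):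
--                 el["Rf_Conf"] = band_Product_RF['2100']
--             elif ( el['cellname'].startswith('C')):
--                 el["Rf_Conf"] = band_Product_RF['900']
--             elif (el['cellname'].startswith('L') ):
--                 el["Rf_Conf"] = band_Product_RF['2600']
--             elif (el['cellname'].startswith('D') ):
--                 el["Rf_Conf"] = band_Product_RF['1800']
--             elif (el['cellname'].startswith('T') ):
--                 el["Rf_Conf"] = band_Product_RF['800']
--             elif (el['cellname'].startswith('K') ):
--                 el["Rf_Conf"] = band_Product_RF['700']
--             else:
--                 el["Rf_Conf"] = ''
--     return list_cell
-- ===== SOURCE B (Python) =====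
-- RULES = [
--     ('userLabel', 'U', '2100'), ('userLabel', 'V', '2100'), ('userLabel', 'W', '2100'),
--     ('userLabel', 'G', '900'),
--     ('cellname', 'P', '2100'), ('cellname', 'Y', '2100'), ('cellname', 'C', '900'),
--     ('cellname', 'L', '2600'), ('cellname', 'D', '1800'), ('cellname', 'T', '800'),
--     ('cellname', 'K', '700'),
-- ]
--
-- def insert_product(list_cell, band_Product_RF):
--     # Inverted loop order: iterate over the rule table; for each rule, assign every
--     # still-pending element that it matches; finally blank the elements no rule matched.
--     pending = list(range(len(list_cell)))
--     for field, prefix, band in RULES: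
--         still = []
--         for i in pending:
--             el = list_cell[i]
--             if ('userLabel' in el) == (field == 'userLabel') and el[field].startswith(prefix):
--                 el['Rf_Conf'] = band_Product_RF[band]
--             else:
--                 still.append(i)
--         pending = still
--     for i in pending:
--         list_cell[i]['Rf_Conf'] = ''
--     return list_cell
-- ===== Notes on version B (the rewrite author's own statement) =====
-- stated objective: alternative
-- what changed: Inverts the loop nesting: instead of dispatching each element through a branch chain, B iterates over an 11-entry rule table in the outer loop, assigning band_Product_RF[band] to every still-pending element the rule matches (tracked by an index worklist), and finally blanks the elements no rule matched.
import Mathlib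
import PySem

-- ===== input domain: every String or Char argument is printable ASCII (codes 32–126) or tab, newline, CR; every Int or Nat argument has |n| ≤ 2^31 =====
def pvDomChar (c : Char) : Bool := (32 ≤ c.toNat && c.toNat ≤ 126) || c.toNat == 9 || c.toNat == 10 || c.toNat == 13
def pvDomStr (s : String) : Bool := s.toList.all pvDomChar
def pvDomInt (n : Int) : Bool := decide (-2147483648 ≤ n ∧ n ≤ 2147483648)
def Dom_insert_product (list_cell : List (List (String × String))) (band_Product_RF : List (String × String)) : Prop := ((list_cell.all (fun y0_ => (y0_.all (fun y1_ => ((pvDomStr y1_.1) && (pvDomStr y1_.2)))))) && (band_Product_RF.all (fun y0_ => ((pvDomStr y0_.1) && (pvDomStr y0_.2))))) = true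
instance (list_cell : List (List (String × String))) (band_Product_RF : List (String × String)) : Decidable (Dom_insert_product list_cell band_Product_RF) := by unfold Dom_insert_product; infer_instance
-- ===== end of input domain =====

-- B inverts the loop nesting: an outer loop over an 11-entry rule table assigns the band value
-- to every still-pending element the rule matches (index worklist), then blanks the rest
-- (objective: alternative; same linear cost). A mutates the element dicts in place and returns
-- the same list; the equivalence proved here is about the RETURN value.

-- ===== PORT A =====
-- band_Product_RF[k]  (Python dict subscript; Pre_ guarantees the key is present where it is read)
def pvBandVal (band : List (String × String)) (k : String) : String :=
  ((PySem.Dict.mk band).get? k).getD ""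

-- the body of A's for-loop, acting on one element dict
def pvElemA (band : List (String × String)) (el : List (String × String)) : List (String × String) :=
  let d := PySem.Dict.mk el
  match d.get? "userLabel" with
  | some u =>
      if PySem.Str.startswith u "U" || PySem.Str.startswith u "V" || PySem.Str.startswith u "W" then
        (d.insert "Rf_Conf" (pvBandVal band "2100")).items
      else if PySem.Str.startswith u "G" then
        (d.insert "Rf_Conf" (pvBandVal band "900")).items
      else
        (d.insert "Rf_Conf" "").items
  | none =>
      -- el['cellname'] : Pre_ guarantees the key is present; getD "" is never the read value inside Pre_
      let cn := (d.get? "cellname").getD ""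
      if PySem.Str.startswith cn "P" || PySem.Str.startswith cn "Y" then
        (d.insert "Rf_Conf" (pvBandVal band "2100")).items
      else if PySem.Str.startswith cn "C" then
        (d.insert "Rf_Conf" (pvBandVal band "900")).items
      else if PySem.Str.startswith cn "L" then
        (d.insert "Rf_Conf" (pvBandVal band "2600")).items
      else if PySem.Str.startswith cn "D" then
        (d.insert "Rf_Conf" (pvBandVal band "1800")).items
      else if PySem.Str.startswith cn "T" then
        (d.insert "Rf_Conf" (pvBandVal band "800")).items
      else if PySem.Str.startswith cn "K" then
        (d.insert "Rf_Conf" (pvBandVal band "700")).items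
      else
        (d.insert "Rf_Conf" "").items

def insert_product (list_cell : List (List (String × String))) (band_Product_RF : List (String × String)) : List (List (String × String)) :=
  list_cell.map (pvElemA band_Product_RF)

-- ===== PORT B =====
-- the RULES table of Source B: (field, prefix, band)
def pvRulesB : List (String × String × String) :=
  [("userLabel","U","2100"),("userLabel","V","2100"),("userLabel","W","2100"),("userLabel","G","900"),
   ("cellname","P","2100"),("cellname","Y","2100"),("cellname","C","900"),
   ("cellname","L","2600"),("cellname","D","1800"),("cellname","T","800"),("cellname","K","700")]

-- ('userLabel' in el) == (field == 'userLabel') and el[field].startswith(prefix)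
def pvMatchR (r : String × String × String) (el : List (String × String)) : Bool :=
  (((PySem.Dict.mk el).get? "userLabel").isSome == (r.1 == "userLabel")) &&
    PySem.Str.startswith (((PySem.Dict.mk el).get? r.1).getD "") r.2.1

-- el['Rf_Conf'] = band_Product_RF[band]
def pvUpdR (band : List (String × String)) (r : String × String × String)
    (el : List (String × String)) : List (String × String) :=
  ((PySem.Dict.mk el).insert "Rf_Conf" (pvBandVal band r.2.2)).items

-- body of Source B's inner loop over the pending indices (state: cells × still)
def pvInnerB (band : List (String × String)) (r : String × String × String)
    (st : List (List (String × String)) × List Nat) (i : Nat) :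
    List (List (String × String)) × List Nat :=
  let el := st.1.getD i []
  if pvMatchR r el then (st.1.set i (pvUpdR band r el), st.2)
  else (st.1, st.2 ++ [i])

-- el['Rf_Conf'] = ''  (final blanking pass)
def pvFillB (c : List (List (String × String))) (i : Nat) : List (List (String × String)) :=
  c.set i (((PySem.Dict.mk (c.getD i [])).insert "Rf_Conf" "").items)

def insert_product_alt (list_cell : List (List (String × String))) (band_Product_RF : List (String × String)) : List (List (String × String)) :=
  let st := pvRulesB.foldl
    (fun st r => st.2.foldl (pvInnerB band_Product_RF r) (st.1, ([] : List Nat)))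
    (list_cell, List.range list_cell.length)
  st.2.foldl pvFillB st.1

-- ===== PRECONDITION & SPEC =====
-- which band_Product_RF key an element makes the Python read (none = no subscript happens)
def pvNeedKey (el : List (String × String)) : Option String :=
  match (PySem.Dict.mk el).get? "userLabel" with
  | some u =>
      if PySem.Str.startswith u "U" || PySem.Str.startswith u "V" || PySem.Str.startswith u "W" then some "2100"
      else if PySem.Str.startswith u "G" then some "900"
      else none
  | none =>
      match (PySem.Dict.mk el).get? "cellname" with
      | some cn =>
          if PySem.Str.startswith cn "P" || PySem.Str.startswith cn "Y" then some "2100"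
          else if PySem.Str.startswith cn "C" then some "900"
          else if PySem.Str.startswith cn "L" then some "2600"
          else if PySem.Str.startswith cn "D" then some "1800"
          else if PySem.Str.startswith cn "T" then some "800"
          else if PySem.Str.startswith cn "K" then some "700"
          else none
      | none => none

-- Pre_ excludes exactly the inputs on which Python A raises a KeyError: an element with neither
-- 'userLabel' nor 'cellname', or a needed band key ('2100'/'900'/…) absent from band_Product_RF.
def Pre_insert_product (list_cell : List (List (String × String))) (band_Product_RF : List (String × String)) : Prop :=
  ∀ el ∈ list_cell,
    (((PySem.Dict.mk el).get? "userLabel").isSome ∨ ((PySem.Dict.mk el).get? "cellname").isSome)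
    ∧ (pvNeedKey el).all (fun k => ((PySem.Dict.mk band_Product_RF).get? k).isSome) = true
instance (list_cell : List (List (String × String))) (band_Product_RF : List (String × String)) : Decidable (Pre_insert_product list_cell band_Product_RF) := by unfold Pre_insert_product; infer_instance

def pvWitness_insert_product : (List (List (String × String))) × (List (String × String)) :=
  ([[("userLabel", "U21A"), ("cellId", "7")], [("cellname", "LTE1")]],
   [("2100", "RRU-2100"), ("2600", "RRU-2600")])

def Spec_insert_product (list_cell : List (List (String × String))) (band_Product_RF : List (String × String)) (out : List (List (String × String))) : Prop := out = insert_product_alt list_cell band_Product_RF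
instance (list_cell : List (List (String × String))) (band_Product_RF : List (String × String)) (out : List (List (String × String))) : Decidable (Spec_insert_product list_cell band_Product_RF out) := by unfold Spec_insert_product; infer_instance

-- ===== CLAIM (what is proved, stated in full; the proofs are below) =====
def Claim_equal_insert_product : Prop := ∀ (list_cell : List (List (String × String))) (band_Product_RF : List (String × String)), Dom_insert_product list_cell band_Product_RF → Pre_insert_product list_cell band_Product_RF → Spec_insert_product list_cell band_Product_RF (insert_product list_cell band_Product_RF)

-- ===== LEMMAS AND PROOFS =====

-- first-match scan of a rules list, acting on one element (the per-element meaning of B's loops)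
def pvScan (band : List (String × String)) :
    List (String × String × String) → List (String × String) → List (String × String)
  | [], el => ((PySem.Dict.mk el).insert "Rf_Conf" "").items
  | r :: rs, el => if pvMatchR r el then pvUpdR band r el else pvScan band rs el

set_option maxHeartbeats 2000000 in
theorem elemA_eq_scan (band el : List (String × String)) :
    pvElemA band el = pvScan band pvRulesB el := by
  unfold pvElemA pvRulesB
  cases h : (PySem.Dict.mk el).get? "userLabel" with
  | some u =>
      simp only [pvScan, pvMatchR, pvUpdR, h, Option.isSome_some,
        show (("userLabel":String) == "userLabel") = true from by decide,
        show (("cellname":String) == "userLabel") = false from by decide]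
      norm_num
      split_ifs <;> first | rfl | tauto
  | none =>
      simp only [pvScan, pvMatchR, pvUpdR, h, Option.isSome_none,
        show (("userLabel":String) == "userLabel") = true from by decide,
        show (("cellname":String) == "userLabel") = false from by decide]
      norm_num
      split_ifs <;> first | rfl | tauto

theorem getD_set_self {α : Type} (l : List α) (i : Nat) (v d : α) (h : i < l.length) :
    (l.set i v).getD i d = v := by
  simp [List.getD, h]

theorem getD_set_ne {α : Type} (l : List α) (i j : Nat) (v d : α) (h : i ≠ j) :
    (l.set i v).getD j d = l.getD j d := by
  simp [List.getD, List.getElem?_set_ne h]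

theorem pvScan_cons (band : List (String × String)) (r : String × String × String)
    (rs : List (String × String × String)) (el : List (String × String)) :
    pvScan band (r :: rs) el = if pvMatchR r el then pvUpdR band r el else pvScan band rs el := rfl

-- inner loop characterisation
theorem innerB_char (band : List (String × String)) (r : String × String × String) :
    ∀ (p : List Nat) (c : List (List (String × String))) (acc : List Nat),
      p.Nodup → (∀ i ∈ p, i < c.length) →
      (p.foldl (pvInnerB band r) (c, acc)).1.length = c.length ∧
      (p.foldl (pvInnerB band r) (c, acc)).2
        = acc ++ p.filter (fun i => !pvMatchR r (c.getD i [])) ∧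
      ∀ j, (p.foldl (pvInnerB band r) (c, acc)).1.getD j []
        = if j ∈ p ∧ pvMatchR r (c.getD j []) then pvUpdR band r (c.getD j []) else c.getD j [] := by
  intro p
  induction p with
  | nil => intro c acc _ _; simp
  | cons i t ih =>
      intro c acc hnd hb
      have hit : i ∉ t := (List.nodup_cons.mp hnd).1
      have hnt : t.Nodup := (List.nodup_cons.mp hnd).2
      have hic : i < c.length := hb i (by simp)
      have hbt : ∀ j ∈ t, j < c.length := fun j hj => hb j (List.mem_cons_of_mem _ hj)
      by_cases hm : pvMatchR r (c.getD i []) = true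
      · have hstep : pvInnerB band r (c, acc) i
            = (c.set i (pvUpdR band r (c.getD i [])), acc) := by
          simp only [pvInnerB]
          rw [hm]
          rfl
        have hb' : ∀ j ∈ t, j < (c.set i (pvUpdR band r (c.getD i []))).length := by
          simp only [List.length_set]; exact hbt
        obtain ⟨ih1, ih2, ih3⟩ := ih (c.set i (pvUpdR band r (c.getD i []))) acc hnt hb'
        have hsame : ∀ j, j ≠ i → (c.set i (pvUpdR band r (c.getD i []))).getD j [] = c.getD j [] := by
          intro j hj; exact getD_set_ne _ _ _ _ _ (fun h => hj h.symm)
        have hself : (c.set i (pvUpdR band r (c.getD i []))).getD i [] = pvUpdR band r (c.getD i []) :=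
          getD_set_self _ _ _ _ hic
        refine ⟨?_, ?_, ?_⟩
        · simp only [List.foldl_cons, hstep]; rw [ih1]; simp
        · simp only [List.foldl_cons, hstep]; rw [ih2]
          have hcond : (!pvMatchR r (c.getD i [])) = false := by rw [hm]; rfl
          rw [List.filter_cons, hcond]
          simp only [Bool.false_eq_true, if_false]
          congr 1
          refine List.filter_congr (fun j hj => ?_)
          rw [hsame j (fun h => hit (h ▸ hj))]
        · intro j
          simp only [List.foldl_cons, hstep]; rw [ih3 j]
          by_cases hji : j = i
          · subst hji
            rw [if_neg (fun hc => hit hc.1), hself, if_pos ⟨by simp, hm⟩]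
          · rw [hsame j hji]
            by_cases hjt : j ∈ t
            · by_cases hmj : pvMatchR r (c.getD j []) = true
              · rw [if_pos ⟨hjt, hmj⟩, if_pos ⟨List.mem_cons_of_mem _ hjt, hmj⟩]
              · rw [if_neg (fun hc => hmj hc.2), if_neg (fun hc => hmj hc.2)]
            · rw [if_neg (fun hc => hjt hc.1),
                 if_neg (fun hc => (List.mem_cons.mp hc.1).elim hji hjt)]
      · have hcond : (!pvMatchR r (c.getD i [])) = true := by rw [Bool.eq_false_iff.mpr hm]; rfl
        have hstep : pvInnerB band r (c, acc) i = (c, acc ++ [i]) := by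
          simp only [pvInnerB]
          rw [Bool.eq_false_iff.mpr hm]
          rfl
        obtain ⟨ih1, ih2, ih3⟩ := ih c (acc ++ [i]) hnt hbt
        refine ⟨?_, ?_, ?_⟩
        · simp only [List.foldl_cons, hstep]; exact ih1
        · simp only [List.foldl_cons, hstep]; rw [ih2]
          rw [List.filter_cons, hcond]
          simp
        · intro j
          simp only [List.foldl_cons, hstep]; rw [ih3 j]
          by_cases hji : j = i
          · subst hji
            rw [if_neg (fun hc => hit hc.1), if_neg (fun hc => hm hc.2)]
          · by_cases hjt : j ∈ t
            · by_cases hmj : pvMatchR r (c.getD j []) = true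
              · rw [if_pos ⟨hjt, hmj⟩, if_pos ⟨List.mem_cons_of_mem _ hjt, hmj⟩]
              · rw [if_neg (fun hc => hmj hc.2), if_neg (fun hc => hmj hc.2)]
            · rw [if_neg (fun hc => hjt hc.1),
                 if_neg (fun hc => (List.mem_cons.mp hc.1).elim hji hjt)]

-- final blanking pass characterisation
theorem fillB_char :
    ∀ (p : List Nat) (c : List (List (String × String))),
      p.Nodup → (∀ i ∈ p, i < c.length) →
      (p.foldl pvFillB c).length = c.length ∧
      ∀ j, (p.foldl pvFillB c).getD j []
        = if j ∈ p then ((PySem.Dict.mk (c.getD j [])).insert "Rf_Conf" "").items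
          else c.getD j [] := by
  intro p
  induction p with
  | nil => intro c _ _; simp
  | cons i t ih =>
      intro c hnd hb
      have hit : i ∉ t := (List.nodup_cons.mp hnd).1
      have hnt : t.Nodup := (List.nodup_cons.mp hnd).2
      have hic : i < c.length := hb i (by simp)
      have hbt : ∀ j ∈ t, j < c.length := fun j hj => hb j (List.mem_cons_of_mem _ hj)
      have hstep : pvFillB c i
          = c.set i (((PySem.Dict.mk (c.getD i [])).insert "Rf_Conf" "").items) := rfl
      have hb' : ∀ j ∈ t, j < (c.set i (((PySem.Dict.mk (c.getD i [])).insert "Rf_Conf" "").items)).length := by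
        simp only [List.length_set]; exact hbt
      obtain ⟨ih1, ih2⟩ := ih (c.set i (((PySem.Dict.mk (c.getD i [])).insert "Rf_Conf" "").items)) hnt hb'
      have hsame : ∀ j, j ≠ i →
          (c.set i (((PySem.Dict.mk (c.getD i [])).insert "Rf_Conf" "").items)).getD j [] = c.getD j [] := by
        intro j hj; exact getD_set_ne _ _ _ _ _ (fun h => hj h.symm)
      have hself : (c.set i (((PySem.Dict.mk (c.getD i [])).insert "Rf_Conf" "").items)).getD i []
          = ((PySem.Dict.mk (c.getD i [])).insert "Rf_Conf" "").items :=
        getD_set_self _ _ _ _ hic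
      refine ⟨?_, ?_⟩
      · simp only [List.foldl_cons, hstep]; rw [ih1]; simp
      · intro j
        simp only [List.foldl_cons, hstep]; rw [ih2 j]
        by_cases hji : j = i
        · subst hji
          rw [if_neg hit, hself, if_pos (by simp)]
        · rw [hsame j hji]
          by_cases hjt : j ∈ t
          · rw [if_pos hjt, if_pos (List.mem_cons_of_mem _ hjt)]
          · rw [if_neg hjt, if_neg (fun hc => (List.mem_cons.mp hc).elim hji hjt)]

-- outer loop over the rules list: what B's whole pipeline computes, pointwise
theorem outerB_char (band : List (String × String)) :
    ∀ (rules : List (String × String × String)) (c : List (List (String × String))) (p : List Nat),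
      p.Nodup → (∀ i ∈ p, i < c.length) →
      ((rules.foldl (fun st r => st.2.foldl (pvInnerB band r) (st.1, ([] : List Nat))) (c, p)).2.foldl
          pvFillB
          (rules.foldl (fun st r => st.2.foldl (pvInnerB band r) (st.1, ([] : List Nat))) (c, p)).1).length
        = c.length ∧
      ∀ j, ((rules.foldl (fun st r => st.2.foldl (pvInnerB band r) (st.1, ([] : List Nat))) (c, p)).2.foldl
          pvFillB
          (rules.foldl (fun st r => st.2.foldl (pvInnerB band r) (st.1, ([] : List Nat))) (c, p)).1).getD j []
        = if j ∈ p then pvScan band rules (c.getD j []) else c.getD j [] := by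
  intro rules
  induction rules with
  | nil =>
      intro c p hnd hb
      obtain ⟨h1, h2⟩ := fillB_char p c hnd hb
      refine ⟨by simp only [List.foldl_nil]; exact h1, ?_⟩
      intro j; simp only [List.foldl_nil]; rw [h2 j]; simp [pvScan]
  | cons r rs ih =>
      intro c p hnd hb
      obtain ⟨i1, i2, i3⟩ := innerB_char band r p c [] hnd hb
      have hp1 : (p.foldl (pvInnerB band r) (c, ([] : List Nat))).2
          = p.filter (fun i => !pvMatchR r (c.getD i [])) := by
        rw [i2]; simp
      have hnd1 : (p.foldl (pvInnerB band r) (c, ([] : List Nat))).2.Nodup := by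
        rw [hp1]; exact hnd.filter _
      have hb1 : ∀ i ∈ (p.foldl (pvInnerB band r) (c, ([] : List Nat))).2,
          i < (p.foldl (pvInnerB band r) (c, ([] : List Nat))).1.length := by
        rw [i1, hp1]; exact fun i hi => hb i (List.mem_of_mem_filter hi)
      obtain ⟨o1, o2⟩ := ih (p.foldl (pvInnerB band r) (c, ([] : List Nat))).1
        (p.foldl (pvInnerB band r) (c, ([] : List Nat))).2 hnd1 hb1
      constructor
      · simp only [List.foldl_cons]; rw [o1, i1]
      · intro j
        simp only [List.foldl_cons]; rw [o2 j, i3 j]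
        by_cases hjp : j ∈ p
        · by_cases hmj : pvMatchR r (c.getD j []) = true
          · have hjn : j ∉ (p.foldl (pvInnerB band r) (c, ([] : List Nat))).2 := by
              rw [hp1]
              intro hmem
              have hh := (List.mem_filter.mp hmem).2
              rw [hmj] at hh
              simp at hh
            rw [if_neg hjn, if_pos ⟨hjp, hmj⟩, if_pos hjp]
            rw [pvScan_cons, if_pos hmj]
          · have hjy : j ∈ (p.foldl (pvInnerB band r) (c, ([] : List Nat))).2 := by
              rw [hp1]
              refine List.mem_filter.mpr ⟨hjp, ?_⟩
              rw [Bool.eq_false_iff.mpr hmj]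
              rfl
            rw [if_pos hjy, if_neg (fun hc => hmj hc.2), if_pos hjp]
            rw [pvScan_cons, if_neg hmj]
        · have hjn : j ∉ (p.foldl (pvInnerB band r) (c, ([] : List Nat))).2 := by
            rw [hp1]; intro h; exact hjp (List.mem_of_mem_filter h)
          rw [if_neg hjn, if_neg (fun hc => hjp hc.1), if_neg hjp]

theorem getD_map (band : List (String × String)) (l : List (List (String × String))) (j : Nat)
    (h : j < l.length) :
    (l.map (pvElemA band)).getD j [] = pvElemA band (l.getD j []) := by
  rw [List.getD_eq_getElem?_getD, List.getD_eq_getElem?_getD, List.getElem?_map,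
     List.getElem?_eq_getElem h]
  rfl

theorem ports_eq (list_cell : List (List (String × String))) (band : List (String × String)) :
    insert_product list_cell band = insert_product_alt list_cell band := by
  obtain ⟨h1, h2⟩ := outerB_char band pvRulesB list_cell (List.range list_cell.length)
    (List.nodup_range) (fun i hi => List.mem_range.mp hi)
  unfold insert_product insert_product_alt
  have hlen : (list_cell.map (pvElemA band)).length
      = ((pvRulesB.foldl (fun st r => st.2.foldl (pvInnerB band r) (st.1, ([] : List Nat)))
          (list_cell, List.range list_cell.length)).2.foldl pvFillB
         (pvRulesB.foldl (fun st r => st.2.foldl (pvInnerB band r) (st.1, ([] : List Nat)))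
          (list_cell, List.range list_cell.length)).1).length := by
    rw [h1]; simp
  refine List.ext_getElem hlen.symm ?_ |>.symm
  intro j hj hj'
  have hjl : j < list_cell.length := by simpa using hj'
  have hB := h2 j
  rw [if_pos (List.mem_range.mpr hjl)] at hB
  have hA : (list_cell.map (pvElemA band)).getD j [] = pvElemA band (list_cell.getD j []) :=
    getD_map band list_cell j hjl
  have hEq : ((pvRulesB.foldl (fun st r => st.2.foldl (pvInnerB band r) (st.1, ([] : List Nat)))
          (list_cell, List.range list_cell.length)).2.foldl pvFillB
         (pvRulesB.foldl (fun st r => st.2.foldl (pvInnerB band r) (st.1, ([] : List Nat)))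
          (list_cell, List.range list_cell.length)).1).getD j []
      = (list_cell.map (pvElemA band)).getD j [] := by
    rw [hB, hA, elemA_eq_scan]
  rw [List.getD_eq_getElem?_getD, List.getD_eq_getElem?_getD,
     List.getElem?_eq_getElem hj, List.getElem?_eq_getElem hj'] at hEq
  exact hEq

-- ===== VERDICT (by name: the statement is the Claim_ definition above) =====
theorem insert_product_spec : Claim_equal_insert_product := by
  intro list_cell band _ _
  unfold Spec_insert_product
  exact ports_eq list_cell band
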